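-- pv_equiv track=rewrite | github.com/mattdinhnguyen/algos | stacks.py | subArrElmLessK
-- ===== SOURCE A (Python) =====
-- def subArrElmLessK(a,k):
--     st = []
--     subArrs = []
--     for i,v in enumerate(a):
--         if st and v >= k:
--             subArrs.append((st.pop(),i)) # a[i:j], element < k
--         elif st:
--             continue
--         elif v < k:
--             st.append(i)
--     if st:
--         subArrs.append((st.pop(),len(a)))
--     ans = sum([(j-i)*(j-i+1)//2 for i,j in subArrs])
--     return ans
-- ===== SOURCE B (Python) =====
-- def subArrElmLessK(a, k):
--     # Count, for each index, the subarrays ENDING there: that count is the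
--     # length of the streak of elements < k ending at that index.
--     ans = 0
--     streak = 0
--     for v in a:
--         streak = streak + 1 if v < k else 0
--         ans += streak
--     return ans
-- ===== Notes on version B (the rewrite author's own statement) =====
-- stated objective: simpler
-- what changed: Instead of locating maximal runs of elements < k via a stack, storing an interval list and summing run*(run+1)//2 per interval in a second pass, B counts the subarrays ending at each index (the streak length of elements < k there) and adds that count per element, so no stack, no intervals, no triangular formula and no integer division appear.
import Mathlib
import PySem

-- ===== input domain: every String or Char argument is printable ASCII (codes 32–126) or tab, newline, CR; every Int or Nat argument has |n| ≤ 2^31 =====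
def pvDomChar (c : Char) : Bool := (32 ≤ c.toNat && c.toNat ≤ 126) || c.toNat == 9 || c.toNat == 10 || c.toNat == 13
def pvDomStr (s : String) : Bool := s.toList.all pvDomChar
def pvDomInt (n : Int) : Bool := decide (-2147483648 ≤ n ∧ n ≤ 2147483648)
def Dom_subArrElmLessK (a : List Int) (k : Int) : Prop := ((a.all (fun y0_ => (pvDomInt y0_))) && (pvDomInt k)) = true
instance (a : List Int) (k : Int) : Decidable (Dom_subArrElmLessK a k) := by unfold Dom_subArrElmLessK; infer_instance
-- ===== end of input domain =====

-- B drops A's stack, interval list and per-run triangular formula: it counts the subarrays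
-- ending at each index (the streak length there); return values proved equal on all inputs.

-- ===== PORT A =====
-- loop body: if st and v >= k: subArrs.append((st.pop(), i)); elif st: continue; elif v < k: st.append(i)
def stepA (k : Int) (s : List Int × List (Int × Int)) (iv : Int × Int) :
    List Int × List (Int × Int) :=
  if s.1 ≠ [] ∧ iv.2 ≥ k then
    match PySem.List.pop? s.1 (-1) with
    | some (x, rest) => (rest, s.2 ++ [(x, iv.1)])
    | none => s
  else if s.1 ≠ [] then s
  else if iv.2 < k then (s.1 ++ [iv.1], s.2)
  else s

-- (j-i)*(j-i+1)//2 for one interval (i, j)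
def fA (p : Int × Int) : Int := PySem.Int.floordiv ((p.2 - p.1) * (p.2 - p.1 + 1)) 2

-- "if st: subArrs.append((st.pop(), len(a)))" followed by "sum([... for i,j in subArrs])"
def finishA (s : List Int × List (Int × Int)) (n : Int) : Int :=
  match PySem.List.pop? s.1 (-1) with
  | some (x, _) => ((s.2 ++ [(x, n)]).map fA).sum
  | none => (s.2.map fA).sum

def subArrElmLessK (a : List Int) (k : Int) : Int :=
  finishA ((PySem.List.enumerate a 0).foldl (stepA k) ([], [])) (a.length : Int)

-- ===== PORT B =====
-- state (ans, streak): streak = streak+1 if v<k else 0; ans += streak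
def stepB (k : Int) (s : Int × Int) (v : Int) : Int × Int :=
  let streak := if v < k then s.2 + 1 else 0
  (s.1 + streak, streak)

def subArrElmLessK_alt (a : List Int) (k : Int) : Int :=
  (a.foldl (stepB k) (0, 0)).1

-- ===== PRECONDITION & SPEC =====
def Spec_subArrElmLessK (a : List Int) (k : Int) (out : Int) : Prop := out = subArrElmLessK_alt a k
instance (a : List Int) (k : Int) (out : Int) : Decidable (Spec_subArrElmLessK a k out) := by unfold Spec_subArrElmLessK; infer_instance

-- ===== CLAIM (what is proved, stated in full; the proofs are below) =====
def Claim_equal_subArrElmLessK : Prop := ∀ (a : List Int) (k : Int), Dom_subArrElmLessK a k → Spec_subArrElmLessK a k (subArrElmLessK a k)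

-- ===== LEMMAS AND PROOFS =====

-- run*(run+1)//2, the value A contributes for a finished run
def T (r : Int) : Int := PySem.Int.floordiv (r * (r + 1)) 2

lemma T_succ (r : Int) : T (r + 1) = T r + (r + 1) := by
  obtain ⟨c, hc⟩ := Int.even_mul_succ_self r
  unfold T
  rw [PySem.Int.floordiv_eq_ediv_of_pos (by omega), PySem.Int.floordiv_eq_ediv_of_pos (by omega)]
  have h1 : r * (r + 1) = 2 * c := by omega
  have h2 : (r + 1) * (r + 1 + 1) = 2 * (c + r + 1) := by nlinarith
  rw [h1, h2, Int.mul_ediv_cancel_left _ (by norm_num), Int.mul_ediv_cancel_left _ (by norm_num)]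
  ring

-- A's stack, expressed by the current run length: empty iff run = 0, else the run's start index
def stOf (i run : Int) : List Int := if run = 0 then [] else [i - run]

lemma key (k : Int) : ∀ (l : List Int) (i run ansA : Int) (sa : List (Int × Int)),
    0 ≤ run → (sa.map fA).sum = ansA →
    finishA ((PySem.List.enumerate l i).foldl (stepA k) (stOf i run, sa)) (i + (l.length : Int))
      = (l.foldl (stepB k) (ansA + T run, run)).1 := by
  intro l
  induction l with
  | nil =>
    intro i run ansA sa hr hsum
    by_cases h : run = 0
    · subst h
      simp only [PySem.List.enumerate, List.foldl_nil, List.length_nil, Nat.cast_zero, add_zero]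
      rw [show stOf i 0 = [] from rfl, finishA]
      simp [PySem.List.pop?, hsum, T]
    · simp only [PySem.List.enumerate, List.foldl_nil, List.length_nil, Nat.cast_zero, add_zero]
      rw [show stOf i run = [] ++ [i - run] by simp [stOf, h], finishA, PySem.List.pop?_last]
      simp only [List.map_append, List.map_cons, List.map_nil, List.sum_append, List.sum_cons,
        List.sum_nil, add_zero, hsum, fA, T]
      ring_nf
  | cons v t ih =>
    intro i run ansA sa hr hsum
    rw [PySem.List.enumerate_cons]
    simp only [List.foldl_cons, List.length_cons]
    have hlen : i + ((t.length + 1 : Nat) : Int) = (i + 1) + (t.length : Int) := by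
      push_cast; ring
    by_cases hv : v < k
    · have hst : stepA k (stOf i run, sa) (i, v) = (stOf (i + 1) (run + 1), sa) := by
        by_cases h : run = 0
        · subst h
          simp [stepA, stOf, not_le.mpr hv, hv]
        · have h1 : stOf i run = [i - run] := by simp [stOf, h]
          have h2 : stOf (i + 1) (run + 1) = [i - run] := by
            simp only [stOf, if_neg (show ¬run + 1 = 0 by omega)]
            congr 1; ring
          rw [h1, h2, stepA]
          simp [not_le.mpr hv]
      have hstep : stepB k (ansA + T run, run) v = (ansA + T (run + 1), run + 1) := by
        simp only [stepB, if_pos hv, T_succ]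
        exact Prod.ext (by ring) rfl
      rw [hst, hstep, hlen]
      exact ih (i + 1) (run + 1) ansA sa (by omega) hsum
    · by_cases h : run = 0
      · have hst : stepA k (stOf i run, sa) (i, v) = (stOf (i + 1) 0, sa) := by
          subst h; simp [stepA, stOf, hv]
        have hstep : stepB k (ansA + T run, run) v = (ansA + T 0, 0) := by
          subst h; simp [stepB, hv]
        rw [hst, hstep, hlen]
        exact ih (i + 1) 0 ansA sa (by omega) hsum
      · have hst : stepA k (stOf i run, sa) (i, v) = (stOf (i + 1) 0, sa ++ [(i - run, i)]) := by
          rw [show stOf i run = [] ++ [i - run] by simp [stOf, h], stepA]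
          simp only [ne_eq, not_lt.mp hv, and_true, PySem.List.pop?_last]
          rfl
        have hstep : stepB k (ansA + T run, run) v = ((ansA + T run) + T 0, 0) := by
          simp only [stepB, if_neg hv]
          exact Prod.ext (by simp [T]) rfl
        rw [hst, hstep, hlen]
        refine ih (i + 1) 0 (ansA + T run) (sa ++ [(i - run, i)]) (by omega) ?_
        simp only [List.map_append, List.map_cons, List.map_nil, List.sum_append, List.sum_cons,
          List.sum_nil, add_zero, hsum, fA, T]
        ring_nf

-- ===== VERDICT (by name: the statement is the Claim_ definition above) =====
theorem subArrElmLessK_spec : Claim_equal_subArrElmLessK := by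
  intro a k _
  unfold Spec_subArrElmLessK subArrElmLessK subArrElmLessK_alt
  have := key k a 0 0 0 [] (by omega) (by simp)
  simpa [stOf, T] using this
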